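-- pv_equiv track=rewrite | github.com/bbi-lab/bbi-sciatac-demux | src/test_p5_orientation.py | construct_mismatch_to_whitelist_map
-- ===== SOURCE A (Python) =====
-- import itertools
--
-- def generate_mismatches(sequence, num_mismatches, allow_n=True):
--     """
--     Generate a list of mismatched sequences to a given sequence. Must only contain ATGC.
--     This is heavily based on a biostars answer.
--     Args:
--         sequence (str): The sequence must contain only A, T, G, and C
--         num_mismatches (int): number of mismatches to generate sequences for
--         allow_n (bool): True to allow N bases and False if not
--     Yield:
--     """
--     letters = 'ACGT'
--
--     if allow_n:
--         letters += 'N'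
--
--     sequence = sequence.upper()
--     mismatches = []
--
--     # generate combinations of num_mismatch indices into the sequence
--     for locs in itertools.combinations(range(len(sequence)), num_mismatches):
--         # convert sequence to list of characters
--         sequence_list = [[char] for char in sequence]
--         for loc in locs:
--             orig_char = sequence[loc]
--             # replace target character with list of mismatches
--             sequence_list[loc] = [l for l in letters if l != orig_char]
--
--         # expand lists as cartesian product (and convert list of characters to string)
--         for poss in itertools.product(*sequence_list):
--             mismatches.append(''.join(poss))
--
--     return mismatches
--
-- def construct_mismatch_to_whitelist_map(whitelist, edit_distance, allow_n=True):
--     """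
--     Constructs a precomputed set of all mismatches within a specified edit distance and the barcode whitelist.
--     Args:
--         whitelist (set of str): set of whitelist sequences
--         edit_distance (int): max edit distance to consider
--         allow_n (bool): True to allow N bases and False if not
--     Returns:
--         dict: mapping of mismatched sequences to their whitelist sequences
--     """
--
--     mismatch_to_whitelist_map = [None] * (edit_distance + 1)
--
--     mismatch_to_whitelist_map[0] = {k: k for k in whitelist}
--
--     conflicting_mismatches = []  # tracks conflicts where mismatches map to different sequences
--
--     # Doesn't really matter as correction function will never see it,
--     # but exclude any perfect matches to actual seqs by mismatches
--     conflicting_mismatches.extend(list(whitelist))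
--
--     for mismatch_count in range(1, edit_distance + 1):
--         mismatch_to_whitelist_map[mismatch_count] = {}
--
--         for sequence in whitelist:
--             sequence = sequence.upper()
--
--             # Generate all possible mismatches in range
--             mismatches = generate_mismatches(sequence, num_mismatches=mismatch_count, allow_n=allow_n)
--
--             # Construct a mapping to the intended sequences
--             for mismatch in mismatches:
--                 # Check for conflict with existing sequence and track if so
--                 if mismatch in mismatch_to_whitelist_map[mismatch_count]:
--                     conflicting_mismatches.append(mismatch)
--                 mismatch_to_whitelist_map[mismatch_count][mismatch] = sequence
--
--         # Go back and remove any conflicting mismatches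
--         for mismatch in set(conflicting_mismatches):
--             if mismatch in mismatch_to_whitelist_map[mismatch_count]:
--                 del mismatch_to_whitelist_map[mismatch_count][mismatch]
--
--     return mismatch_to_whitelist_map
-- ===== SOURCE B (Python) =====
-- def construct_mismatch_to_whitelist_map(whitelist, edit_distance, allow_n=True):
--     letters = 'ACGTN' if allow_n else 'ACGT'
--
--     def variant_groups(chars, k):
--         # recursive exactly-k-substitution enumerator: one group per set of
--         # changed positions (index-lexicographic), first position varying slowest
--         if k == 0:
--             return [[''.join(chars)]]
--         if not chars:
--             return []
--         c, rest = chars[0], chars[1:]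
--         changed = [[l + t for l in letters if l != c for t in g]
--                    for g in variant_groups(rest, k - 1)]
--         kept = [[c + t for t in g] for g in variant_groups(rest, k)]
--         return changed + kept
--
--     levels = [{k: k for k in whitelist}]
--     banned = set(whitelist)
--     for k in range(1, edit_distance + 1):
--         # phase 1: collect, per generated mismatch, every (uppercased) source producing it
--         sources = {}
--         for seq in whitelist:
--             up = seq.upper()
--             for g in variant_groups(list(up), k):
--                 for m in g:
--                     sources[m] = sources.get(m, []) + [up]
--         # phase 2: ban multi-source mismatches (also for later levels), keep the rest
--         banned |= {m for m, s in sources.items() if len(s) > 1}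
--         levels.append({m: s[0] for m, s in sources.items()
--                        if len(s) == 1 and m not in banned})
--     return levels
-- ===== Notes on version B (the rewrite author's own statement) =====
-- stated objective: alternative
-- what changed: Replaces A's itertools.combinations-of-positions x itertools.product enumeration by a recursive exactly-k-substitution generator over the string, and A's per-level assign-into-dict / track-conflicts-list / delete-later control flow by a two-phase pass that first collects, per generated mismatch, the list of all uppercased sources producing it and then keeps exactly the single-source mismatches not in the accumulated banned set (whitelist plus multi-source mismatches of this and earlier levels).
import Mathlib
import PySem

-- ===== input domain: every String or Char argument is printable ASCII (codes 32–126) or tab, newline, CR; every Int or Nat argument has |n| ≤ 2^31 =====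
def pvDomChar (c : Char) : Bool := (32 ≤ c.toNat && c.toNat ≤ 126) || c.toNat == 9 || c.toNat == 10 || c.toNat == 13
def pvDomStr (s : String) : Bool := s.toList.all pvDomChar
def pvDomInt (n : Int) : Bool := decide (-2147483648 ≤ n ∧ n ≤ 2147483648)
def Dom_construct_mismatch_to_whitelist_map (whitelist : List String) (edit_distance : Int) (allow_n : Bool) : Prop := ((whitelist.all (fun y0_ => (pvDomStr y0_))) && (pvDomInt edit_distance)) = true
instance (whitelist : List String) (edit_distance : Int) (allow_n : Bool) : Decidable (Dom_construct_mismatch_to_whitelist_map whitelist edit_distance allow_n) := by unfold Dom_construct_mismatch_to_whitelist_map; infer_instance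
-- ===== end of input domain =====

-- B replaces A's itertools combinations×product enumeration by a recursive exactly-k-substitution
-- generator and A's assign/track-conflicts/delete-later map build by a collect-all-sources-then-filter
-- pass per level (objective: alternative, same cost).

-- ===== PORT A =====
-- itertools.product over a list of candidate lists (rightmost varies fastest); exact for finite lists.
def pvProduct : List (List Char) → List (List Char)
  | [] => [[]]
  | l :: ls => l.flatMap (fun c => (pvProduct ls).map (fun cs => c :: cs))

-- Source A's generate_mismatches, step for step
def pv_generate_mismatches (sequence : String) (num_mismatches : Nat) (allow_n : Bool) : List String :=
  let letters : List Char := if allow_n then "ACGT".toList ++ ['N'] else "ACGT".toList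
  let seq : List Char := PySem.Chars.upper sequence.toList
  (PySem.List.combinations (List.range seq.length) num_mismatches).foldl
    (fun mismatches locs =>
      let sequence_list := seq.map (fun char => [char])
      let sequence_list := locs.foldl
        (fun sl loc =>
          let orig_char := seq.getD loc ' '   -- loc ∈ range(len(seq)), always in range
          sl.set loc (letters.filter (fun l => l ≠ orig_char))) sequence_list
      mismatches ++ (pvProduct sequence_list).map (fun poss => String.ofList poss)) []

-- the two inner 'for sequence in whitelist: for mismatch in …' loops of one level of A
def pvA_level (whitelist : List String) (allow_n : Bool) (k : Nat)
    (st0 : PySem.Dict String String × List String) : PySem.Dict String String × List String :=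
  whitelist.foldl (fun st sequence =>
    let s := PySem.Str.upper sequence
    (pv_generate_mismatches s k allow_n).foldl
      (fun st mismatch =>
        let conf := if st.1.contains mismatch then st.2 ++ [mismatch] else st.2
        (st.1.insert mismatch s, conf)) st) st0

def construct_mismatch_to_whitelist_map (whitelist : List String) (edit_distance : Int) (allow_n : Bool) : List (List (String × String)) :=
  if edit_distance < 0 then []   -- Python raises IndexError here; excluded by Pre_
  else
    let map0 : PySem.Dict String String := whitelist.foldl (fun d k => d.insert k k) PySem.Dict.empty
    let st := (PySem.List.pyRange 1 (edit_distance + 1) 1).foldl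
      (fun (st : List (List (String × String)) × List String) mismatch_count =>
        let r := pvA_level whitelist allow_n mismatch_count.toNat (PySem.Dict.empty, st.2)
        -- 'for mismatch in set(conflicting): if … : del …' deletes every key that is in
        -- conflicting; the surviving entries keep their order, independent of set order.
        let level := r.1.items.filter (fun kv => decide (kv.1 ∉ r.2))
        (st.1 ++ [level], r.2))
      ([], whitelist)
    map0.items :: st.1

-- ===== PORT B =====
-- Source B's variant_groups: recursive exactly-k-substitution enumerator, one group (inner list)
-- per set of changed positions; strings are List Char here, joined at the insertion site.
def pvVariantGroups (letters : List Char) : List Char → Nat → List (List (List Char))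
  | chars, 0 => [[chars]]
  | [], _ + 1 => []
  | c :: rest, k + 1 =>
      (pvVariantGroups letters rest k).map
        (fun g => (letters.filter (fun l => l ≠ c)).flatMap (fun l => g.map (fun t => l :: t)))
      ++ (pvVariantGroups letters rest (k + 1)).map (fun g => g.map (fun t => c :: t))

-- phase 1 of one level of B: sources[m] = sources.get(m, []) + [up]
def pvB_sources (letters : List Char) (whitelist : List String) (k : Nat)
    (src0 : PySem.Dict String (List String)) : PySem.Dict String (List String) :=
  whitelist.foldl (fun src seq =>
    let up := PySem.Str.upper seq
    (pvVariantGroups letters up.toList k).foldl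
      (fun src g => g.foldl
        (fun src mc =>
          let m := String.ofList mc
          src.insert m (src.getD m [] ++ [up])) src) src) src0

def construct_mismatch_to_whitelist_map_alt (whitelist : List String) (edit_distance : Int) (allow_n : Bool) : List (List (String × String)) :=
  let letters : List Char := if allow_n then "ACGTN".toList else "ACGT".toList
  let level0 := (whitelist.foldl (fun d k => d.insert k k) (PySem.Dict.empty : PySem.Dict String String)).items
  let st := (PySem.List.pyRange 1 (edit_distance + 1) 1).foldl
    (fun (st : List (List (String × String)) × PySem.Set String) k =>
      let source := pvB_sources letters whitelist k.toNat PySem.Dict.empty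
      let banned := PySem.Set.update st.2
        ((source.items.filter (fun p => decide (1 < p.2.length))).map (fun p => p.1))
      let lvl := (source.items.filter
          (fun p => p.2.length == 1 && !(PySem.Set.contains banned p.1))).map
        (fun p => (p.1, p.2.headD ""))
      (st.1 ++ [lvl], banned))
    ([], PySem.Set.ofList whitelist)
  level0 :: st.1

-- ===== PRECONDITION & SPEC =====
-- Pre_ excludes only negative edit_distance, where the Python A raises IndexError
-- (assignment into the empty [None] * (edit_distance + 1) list).
def Pre_construct_mismatch_to_whitelist_map (whitelist : List String) (edit_distance : Int) (allow_n : Bool) : Prop := 0 ≤ edit_distance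
instance (whitelist : List String) (edit_distance : Int) (allow_n : Bool) : Decidable (Pre_construct_mismatch_to_whitelist_map whitelist edit_distance allow_n) := by unfold Pre_construct_mismatch_to_whitelist_map; infer_instance
def pvWitness_construct_mismatch_to_whitelist_map : List String × Int × Bool := (["AC", "tg"], 1, true)

def Spec_construct_mismatch_to_whitelist_map (whitelist : List String) (edit_distance : Int) (allow_n : Bool) (out : List (List (String × String))) : Prop := out = construct_mismatch_to_whitelist_map_alt whitelist edit_distance allow_n
instance (whitelist : List String) (edit_distance : Int) (allow_n : Bool) (out : List (List (String × String))) : Decidable (Spec_construct_mismatch_to_whitelist_map whitelist edit_distance allow_n out) := by unfold Spec_construct_mismatch_to_whitelist_map; infer_instance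

-- ===== CLAIM (what is proved, stated in full; the proofs are below) =====
def Claim_equal_construct_mismatch_to_whitelist_map : Prop := ∀ (whitelist : List String) (edit_distance : Int) (allow_n : Bool), Dom_construct_mismatch_to_whitelist_map whitelist edit_distance allow_n → Pre_construct_mismatch_to_whitelist_map whitelist edit_distance allow_n → Spec_construct_mismatch_to_whitelist_map whitelist edit_distance allow_n (construct_mismatch_to_whitelist_map whitelist edit_distance allow_n)

-- ===== LEMMAS AND PROOFS =====

-- ---- uppercasing is idempotent (A uppercases the already-uppercased sequence again) ----
theorem pv_upperChar_idem (c : Char) : PySem.Chars.upperChar (PySem.Chars.upperChar c) = PySem.Chars.upperChar c := by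
  unfold PySem.Chars.upperChar PySem.Chars.islower
  split_ifs with h1 h2
  · exfalso
    simp only [Bool.and_eq_true, decide_eq_true_eq, Char.le_def, UInt32.le_iff_toNat_le] at h1 h2
    have h1' : 97 ≤ c.toNat ∧ c.toNat ≤ 122 := h1
    have hv : (c.toNat - 32).isValidChar := Or.inl (by omega)
    have ht : (Char.ofNat (c.toNat - 32)).toNat = c.toNat - 32 := by
      rw [Char.toNat_ofNat, if_pos hv]
    have h2' : 97 ≤ (Char.ofNat (c.toNat - 32)).toNat ∧ (Char.ofNat (c.toNat - 32)).toNat ≤ 122 := h2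
    omega
  · rfl
  · rfl

theorem pv_upper_idem (cs : List Char) : PySem.Chars.upper (PySem.Chars.upper cs) = PySem.Chars.upper cs := by
  unfold PySem.Chars.upper
  rw [List.map_map]
  exact List.map_congr_left (fun c _ => pv_upperChar_idem c)

-- ---- A's combinations×product enumeration equals B's recursive groups, group by group ----

-- A's sequence_list after substituting the locations locs
def pvSlist (letters cs : List Char) (locs : List Nat) : List (List Char) :=
  locs.foldl (fun sl loc => sl.set loc (letters.filter (fun l => l ≠ cs.getD loc ' ')))
    (cs.map (fun char => [char]))

theorem pvProduct_singletons (cs : List Char) : pvProduct (cs.map (fun c => [c])) = [cs] := by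
  induction cs with
  | nil => rfl
  | cons c rest ih => simp [pvProduct, ih]

-- a substitution fold over shifted indices leaves the head alone
theorem pv_setfold_shift (g : Nat → List Char) (ls : List Nat) :
    ∀ (L : List Char) (tail : List (List Char)),
    (ls.map (· + 1)).foldl (fun sl loc => sl.set loc (g loc)) (L :: tail)
      = L :: ls.foldl (fun sl loc => sl.set loc (g (loc + 1))) tail := by
  induction ls with
  | nil => intro L tail; rfl
  | cons a t ih => intro L tail; simp only [List.map_cons, List.foldl_cons, List.set_cons_succ, ih]

theorem pvSlist_shift (letters : List Char) (c : Char) (rest : List Char) (ls : List Nat) :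
    pvSlist letters (c :: rest) (ls.map (· + 1)) = [c] :: pvSlist letters rest ls := by
  unfold pvSlist
  simp only [List.map_cons]
  rw [pv_setfold_shift]
  simp only [List.getD_cons_succ]

theorem pvSlist_zero_shift (letters : List Char) (c : Char) (rest : List Char) (ls : List Nat) :
    pvSlist letters (c :: rest) (0 :: ls.map (· + 1))
      = (letters.filter (fun l => l ≠ c)) :: pvSlist letters rest ls := by
  unfold pvSlist
  simp only [List.map_cons, List.foldl_cons, List.getD_cons_zero, List.set_cons_zero]
  rw [pv_setfold_shift]
  simp only [List.getD_cons_succ]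

theorem pvGroups_eq (letters : List Char) (cs : List Char) :
    ∀ (k : Nat),
    (PySem.List.combinations (List.range cs.length) k).map (fun locs => pvProduct (pvSlist letters cs locs))
      = pvVariantGroups letters cs k := by
  induction cs with
  | nil =>
    intro k
    cases k with
    | zero => simp [PySem.List.combinations_zero, pvVariantGroups, pvSlist, pvProduct]
    | succ k => simp [PySem.List.combinations_nil_succ, pvVariantGroups]
  | cons c rest ih =>
    intro k
    cases k with
    | zero =>
      simp only [PySem.List.combinations_zero, List.map_cons, List.map_nil, pvVariantGroups]
      rw [show pvSlist letters (c :: rest) [] = (c :: rest).map (fun char => [char]) from rfl,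
        pvProduct_singletons]
    | succ k =>
      simp only [List.length_cons, List.range_succ_eq_map, PySem.List.combinations_cons_succ,
        PySem.List.combinations_map, List.map_append, List.map_map, pvVariantGroups]
      congr 1
      · rw [← ih k, List.map_map]
        refine List.map_congr_left (fun lc _ => ?_)
        simp only [Function.comp]
        rw [show (List.map Nat.succ lc) = lc.map (· + 1) from rfl, pvSlist_zero_shift]
        rfl
      · rw [← ih (k + 1), List.map_map]
        refine List.map_congr_left (fun lc _ => ?_)
        simp only [Function.comp]
        rw [show (List.map Nat.succ lc) = lc.map (· + 1) from rfl, pvSlist_shift]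
        simp [pvProduct]

-- A's generate_mismatches is B's groups, flattened and joined to strings
theorem pv_generate_eq (letters : List Char) (s : String) (k : Nat) (allow_n : Bool)
    (hlet : letters = if allow_n then "ACGT".toList ++ ['N'] else "ACGT".toList) :
    pv_generate_mismatches s k allow_n
      = ((pvVariantGroups letters (PySem.Chars.upper s.toList) k).flatten).map String.ofList := by
  unfold pv_generate_mismatches
  rw [← hlet]
  rw [PySem.List.foldl_append_eq_flatMap, List.nil_append]
  rw [← pvGroups_eq letters (PySem.Chars.upper s.toList) k]
  rw [List.flatMap_def, List.map_flatten, List.map_map]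
  rfl

-- ---- simulation between A's (dict, conflict list) and B's source dict per level ----
-- Same keys in order; conf-membership = starting list or ≥2 collected sources; on singleton
-- source lists A's stored value is that single source; stored lists are never empty.
def pvInv (conf0 : List String) (d : PySem.Dict String String) (conf : List String)
    (src : PySem.Dict String (List String)) : Prop :=
  d.keys = src.keys
  ∧ (∀ m, m ∈ conf ↔ m ∈ conf0 ∨ ∃ l, src.get? m = some l ∧ 2 ≤ l.length)
  ∧ (∀ m s, src.get? m = some [s] → d.get? m = some s)
  ∧ (∀ m l, src.get? m = some l → l ≠ [])
  ∧ src.keys.Nodup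

theorem pvInv_contains {conf0 d conf src} (h : pvInv conf0 d conf src) (m : String) :
    d.contains m = src.contains m := by
  by_cases hm : m ∈ src.keys
  · rw [(PySem.Dict.contains_iff_mem_keys d m).2 (by rw [h.1]; exact hm),
      (PySem.Dict.contains_iff_mem_keys src m).2 hm]
  · have h1 : ¬ d.contains m = true := fun hc =>
      hm (by rw [← h.1]; exact (PySem.Dict.contains_iff_mem_keys d m).1 hc)
    have h2 : ¬ src.contains m = true := fun hc =>
      hm ((PySem.Dict.contains_iff_mem_keys src m).1 hc)
    simp only [Bool.not_eq_true] at h1 h2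
    rw [h1, h2]

theorem pvInv_step (conf0 : List String) (d : PySem.Dict String String) (conf : List String)
    (src : PySem.Dict String (List String)) (m s : String) (h : pvInv conf0 d conf src) :
    pvInv conf0 (d.insert m s) (if d.contains m then conf ++ [m] else conf)
      (src.insert m (src.getD m [] ++ [s])) := by
  have hcont := pvInv_contains h m
  refine ⟨?_, ?_, ?_, ?_, PySem.Dict.nodup_keys_insert src m _ h.2.2.2.2⟩
  · by_cases hc : src.contains m = true
    · rw [PySem.Dict.keys_insert_of_contains d s (by rw [hcont]; exact hc),
        PySem.Dict.keys_insert_of_contains src _ hc, h.1]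
    · simp only [Bool.not_eq_true] at hc
      rw [PySem.Dict.keys_insert_of_not_contains d s (by rw [hcont]; exact hc),
        PySem.Dict.keys_insert_of_not_contains src _ hc, h.1]
  · intro m'
    by_cases hc : src.contains m = true
    · have hd : d.contains m = true := by rw [hcont]; exact hc
      have hsome : (src.get? m).isSome = true := by
        rw [← PySem.Dict.contains_eq_isSome_get? src m]; exact hc
      rcases Option.isSome_iff_exists.1 hsome with ⟨l0, hl0⟩
      have hne : l0 ≠ [] := h.2.2.2.1 m l0 hl0
      have hgd : src.getD m [] = l0 := PySem.Dict.getD_of_get?_eq_some src [] hl0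
      by_cases hm' : m' = m
      · subst hm'
        simp only [hd, if_true, List.mem_append, List.mem_singleton]
        rw [PySem.Dict.get?_insert_self src m' _]
        have hlen2 : 2 ≤ (l0 ++ [s]).length := by
          have : 1 ≤ l0.length := List.length_pos_iff.2 hne
          simp [List.length_append]; omega
        constructor
        · intro _
          exact Or.inr ⟨l0 ++ [s], by rw [hgd], hlen2⟩
        · intro _; simp
      · simp only [hd, if_true, List.mem_append, List.mem_singleton, h.2.1 m']
        rw [PySem.Dict.get?_insert_of_ne src _ hm']
        constructor
        · intro hx; rcases hx with hx | hx
          · exact hx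
          · exact absurd hx hm'
        · intro hx; exact Or.inl hx
    · simp only [Bool.not_eq_true] at hc
      have hd : d.contains m = false := by rw [hcont]; exact hc
      have hnone : src.get? m = none := (PySem.Dict.get?_eq_none_iff_contains src m).2 hc
      have hgd : src.getD m [] = [] := PySem.Dict.getD_of_get?_eq_none src [] hnone
      by_cases hm' : m' = m
      · subst hm'
        simp only [hd, Bool.false_eq_true, if_false, h.2.1 m', hnone]
        rw [PySem.Dict.get?_insert_self src m' _, hgd]
        simp
      · simp only [hd, Bool.false_eq_true, if_false, h.2.1 m']
        rw [PySem.Dict.get?_insert_of_ne src _ hm']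
  · intro m' s' hs'
    by_cases hm' : m' = m
    · subst hm'
      rw [PySem.Dict.get?_insert_self src m' _] at hs'
      by_cases hc : src.contains m' = true
      · exfalso
        have hsome : (src.get? m').isSome = true := by
          rw [← PySem.Dict.contains_eq_isSome_get? src m']; exact hc
        rcases Option.isSome_iff_exists.1 hsome with ⟨l0, hl0⟩
        have hne : l0 ≠ [] := h.2.2.2.1 m' l0 hl0
        have hgd : src.getD m' [] = l0 := PySem.Dict.getD_of_get?_eq_some src [] hl0
        rw [hgd] at hs'
        have heq : l0 ++ [s] = [s'] := Option.some.inj hs'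
        have h1 : 1 ≤ l0.length := List.length_pos_iff.2 hne
        have h2 : (l0 ++ [s]).length = 1 := by rw [heq]; rfl
        rw [List.length_append, List.length_singleton] at h2; omega
      · simp only [Bool.not_eq_true] at hc
        have hnone : src.get? m' = none := (PySem.Dict.get?_eq_none_iff_contains src m').2 hc
        have hgd : src.getD m' [] = [] := PySem.Dict.getD_of_get?_eq_none src [] hnone
        rw [hgd, List.nil_append] at hs'
        have hss : s = s' := by simpa using hs' 
        rw [PySem.Dict.get?_insert_self d m' s, hss]
    · rw [PySem.Dict.get?_insert_of_ne src _ hm'] at hs'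
      rw [PySem.Dict.get?_insert_of_ne d s hm']
      exact h.2.2.1 m' s' hs'
  · intro m' l hl
    by_cases hm' : m' = m
    · subst hm'
      rw [PySem.Dict.get?_insert_self src m' _] at hl
      rw [← Option.some.inj hl]
      simp
    · rw [PySem.Dict.get?_insert_of_ne src _ hm'] at hl
      exact h.2.2.2.1 m' l hl

theorem pvInv_inner (conf0 : List String) (s : String) (ms : List String) :
    ∀ (d : PySem.Dict String String) (conf : List String)
      (src : PySem.Dict String (List String)),
    pvInv conf0 d conf src →
    pvInv conf0
      (ms.foldl (fun st mismatch =>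
        ((st.1.insert mismatch s : PySem.Dict String String),
          if st.1.contains mismatch then st.2 ++ [mismatch] else st.2)) (d, conf)).1
      (ms.foldl (fun st mismatch =>
        ((st.1.insert mismatch s : PySem.Dict String String),
          if st.1.contains mismatch then st.2 ++ [mismatch] else st.2)) (d, conf)).2
      (ms.foldl (fun src m => src.insert m (src.getD m [] ++ [s])) src) := by
  induction ms with
  | nil => intro d conf src h; exact h
  | cons m t ih =>
    intro d conf src h
    exact ih _ _ _ (pvInv_step conf0 d conf src m s h)

-- B's nested per-sequence loops are the flat loop over A's generated mismatch list
theorem pvB_inner_eq (letters : List Char) (allow_n : Bool)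
    (hlet : letters = if allow_n then "ACGT".toList ++ ['N'] else "ACGT".toList)
    (seq : String) (k : Nat) (src : PySem.Dict String (List String)) :
    (pvVariantGroups letters (PySem.Str.upper seq).toList k).foldl
      (fun src g => g.foldl
        (fun src mc =>
          let m := String.ofList mc
          src.insert m (src.getD m [] ++ [PySem.Str.upper seq])) src) src
    = (pv_generate_mismatches (PySem.Str.upper seq) k allow_n).foldl
        (fun src m => src.insert m (src.getD m [] ++ [PySem.Str.upper seq])) src := by
  rw [pv_generate_eq letters (PySem.Str.upper seq) k allow_n hlet]
  rw [List.foldl_map, List.foldl_flatten]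
  rw [show PySem.Chars.upper (PySem.Str.upper seq).toList = (PySem.Str.upper seq).toList by
    rw [PySem.Str.toList_upper, pv_upper_idem]]

theorem pvInv_level (letters : List Char) (allow_n : Bool)
    (hlet : letters = if allow_n then "ACGT".toList ++ ['N'] else "ACGT".toList)
    (k : Nat) (conf0 : List String) (ws : List String) :
    ∀ (d : PySem.Dict String String) (conf : List String)
      (src : PySem.Dict String (List String)),
    pvInv conf0 d conf src →
    pvInv conf0 (pvA_level ws allow_n k (d, conf)).1 (pvA_level ws allow_n k (d, conf)).2
      (pvB_sources letters ws k src) := by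
  induction ws with
  | nil => intro d conf src h; exact h
  | cons w t ih =>
    intro d conf src h
    simp only [pvA_level, pvB_sources, List.foldl_cons] at *
    rw [pvB_inner_eq letters allow_n hlet w k src]
    exact ih _ _ _
      (pvInv_inner conf0 (PySem.Str.upper w)
        (pv_generate_mismatches (PySem.Str.upper w) k allow_n) d conf src h)

theorem pvInv_empty (conf0 : List String) :
    pvInv conf0 PySem.Dict.empty conf0 PySem.Dict.empty := by
  refine ⟨by rw [PySem.Dict.keys_empty, PySem.Dict.keys_empty], ?_, ?_, ?_, ?_⟩
  · intro m
    rw [PySem.Dict.get?_empty]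
    simp
  · intro m s hs
    rw [PySem.Dict.get?_empty] at hs
    cases hs
  · intro m l hl
    rw [PySem.Dict.get?_empty] at hl
    cases hl
  · rw [PySem.Dict.keys_empty]; exact List.nodup_nil

-- membership in the extracted multi-source key list = '≥ 2 collected sources'
theorem pv_mem_long_keys (src : PySem.Dict String (List String)) (hnd : src.keys.Nodup)
    (m : String) :
    m ∈ (src.items.filter (fun p => decide (1 < p.2.length))).map (fun p => p.1)
      ↔ ∃ l, src.get? m = some l ∧ 2 ≤ l.length := by
  constructor
  · intro hm
    rcases List.mem_map.1 hm with ⟨p, hp, hp1⟩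
    rcases List.mem_filter.1 hp with ⟨hpi, hpn⟩
    have : src.get? p.1 = some p.2 :=
      (PySem.Dict.get?_eq_some_iff_mem_items src p.1 p.2 hnd).2 (by simpa using hpi)
    exact ⟨p.2, by rw [← hp1]; exact this, by simpa using hpn⟩
  · intro ⟨l, hget, hlen⟩
    have hmem := PySem.Dict.mem_items_of_get?_eq_some src hget
    exact List.mem_map.2 ⟨(m, l), List.mem_filter.2 ⟨hmem, by simp; omega⟩, rfl⟩

-- one full level: A's filtered dict items equal B's filtered-and-projected items,
-- and the updated conflict list / banned set agree in membership
theorem pv_level_eq (letters : List Char) (allow_n : Bool)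
    (hlet : letters = if allow_n then "ACGT".toList ++ ['N'] else "ACGT".toList)
    (ws : List String) (k : Nat) (conf0 : List String)
    (banned0 : PySem.Set String) (hb : ∀ m, m ∈ conf0 ↔ m ∈ banned0) :
    ((pvA_level ws allow_n k (PySem.Dict.empty, conf0)).1.items.filter
        (fun kv => decide (kv.1 ∉ (pvA_level ws allow_n k (PySem.Dict.empty, conf0)).2)))
      = ((pvB_sources letters ws k PySem.Dict.empty).items.filter
          (fun p => p.2.length == 1 &&
            !(PySem.Set.contains (PySem.Set.update banned0
              (((pvB_sources letters ws k PySem.Dict.empty).items.filter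
                (fun p => decide (1 < p.2.length))).map (fun p => p.1))) p.1))).map
        (fun p => (p.1, p.2.headD ""))
    ∧ (∀ m, m ∈ (pvA_level ws allow_n k (PySem.Dict.empty, conf0)).2 ↔
        m ∈ PySem.Set.update banned0
          (((pvB_sources letters ws k PySem.Dict.empty).items.filter
            (fun p => decide (1 < p.2.length))).map (fun p => p.1))) := by
  have hinv := pvInv_level letters allow_n hlet k conf0 ws PySem.Dict.empty conf0
    PySem.Dict.empty (pvInv_empty conf0)
  set d := (pvA_level ws allow_n k (PySem.Dict.empty, conf0)).1 with hd
  set conf := (pvA_level ws allow_n k (PySem.Dict.empty, conf0)).2 with hconf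
  set src := pvB_sources letters ws k PySem.Dict.empty with hsrc
  have hnd : src.keys.Nodup := hinv.2.2.2.2
  have hndd : d.keys.Nodup := by rw [hinv.1]; exact hnd
  have hconfm : ∀ m, m ∈ conf ↔ m ∈ conf0 ∨ ∃ l, src.get? m = some l ∧ 2 ≤ l.length := hinv.2.1
  set bset := PySem.Set.update banned0
      ((src.items.filter (fun p => decide (1 < p.2.length))).map (fun p => p.1)) with hbset
  have hbanned : ∀ m, m ∈ bset ↔ m ∈ banned0 ∨ ∃ l, src.get? m = some l ∧ 2 ≤ l.length := by
    intro m
    rw [hbset, PySem.Set.mem_update, pv_mem_long_keys src hnd m]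
  constructor
  · rw [PySem.Dict.items_eq_map_keys d hndd "", PySem.Dict.items_eq_map_keys src hnd [],
      hinv.1, List.filter_map, List.filter_map, List.map_map]
    have hfc : src.keys.filter
        ((fun kv => decide (kv.1 ∉ conf)) ∘ (fun k => (k, d.getD k "")))
        = src.keys.filter
          ((fun p => p.2.length == 1 && !(PySem.Set.contains bset p.1))
            ∘ (fun k => (k, src.getD k []))) := by
      refine List.filter_congr (fun m hm => ?_)
      have hc : src.contains m = true := (PySem.Dict.contains_iff_mem_keys src m).2 hm
      have hs : (src.get? m).isSome = true := by
        rw [← PySem.Dict.contains_eq_isSome_get? src m]; exact hc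
      rcases Option.isSome_iff_exists.1 hs with ⟨v, hv⟩
      have hvne : v ≠ [] := hinv.2.2.2.1 m v hv
      have hgd : src.getD m [] = v := PySem.Dict.getD_of_get?_eq_some src [] hv
      simp only [Function.comp]
      rw [Bool.eq_iff_iff]
      simp only [decide_eq_true_eq, Bool.and_eq_true, Bool.not_eq_true',
        ← Bool.not_eq_true, PySem.Set.contains_iff, hbanned, hconfm, hgd, beq_iff_eq]
      constructor
      · intro hno
        have hn0 : m ∉ conf0 := fun h0 => hno (Or.inl h0)
        have hnex : ¬ ∃ l, src.get? m = some l ∧ 2 ≤ l.length := fun he => hno (Or.inr he)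
        have hlen : v.length = 1 := by
          have h1 : 1 ≤ v.length := List.length_pos_iff.2 hvne
          rcases Nat.lt_or_ge v.length 2 with hlt | hge
          · omega
          · exact absurd ⟨v, hv, hge⟩ hnex
        refine ⟨hlen, ?_⟩
        rintro (hb0 | he)
        · exact hn0 ((hb m).2 hb0)
        · exact hnex he
      · rintro ⟨hlen, hnb⟩ (h0 | ⟨l, hl, hlen2⟩)
        · exact hnb (Or.inl ((hb m).1 h0))
        · rw [hv] at hl
          cases Option.some.inj hl
          omega
    rw [hfc]
    refine List.map_congr_left (fun m hm => ?_)
    rcases List.mem_filter.1 hm with ⟨hmk, hcond⟩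
    simp only [Function.comp, Bool.and_eq_true, beq_iff_eq] at hcond
    have hc : src.contains m = true := (PySem.Dict.contains_iff_mem_keys src m).2 hmk
    have hs : (src.get? m).isSome = true := by
      rw [← PySem.Dict.contains_eq_isSome_get? src m]; exact hc
    rcases Option.isSome_iff_exists.1 hs with ⟨v, hv⟩
    have hgd : src.getD m [] = v := PySem.Dict.getD_of_get?_eq_some src [] hv
    have hlen : v.length = 1 := by rw [← hgd]; exact hcond.1
    rcases v with _ | ⟨a, t⟩
    · cases hlen
    · have ht : t = [] := by simpa using hlen
      subst ht
      have hda : d.get? m = some a := hinv.2.2.1 m a (by rw [hv])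
      have hga : d.getD m "" = a := PySem.Dict.getD_of_get?_eq_some d "" hda
      simp [Function.comp, hga, hgd]
  · intro m
    rw [hconfm m, hbanned m, hb m]

-- the outer loop over range(1, edit_distance + 1)
theorem pv_outer (letters : List Char) (allow_n : Bool)
    (hlet : letters = if allow_n then "ACGT".toList ++ ['N'] else "ACGT".toList)
    (ws : List String) :
    ∀ (ks : List Int) (acc : List (List (String × String))) (conf : List String)
      (banned : PySem.Set String), (∀ m, m ∈ conf ↔ m ∈ banned) →
    (ks.foldl (fun (st : List (List (String × String)) × List String) mismatch_count =>
        let r := pvA_level ws allow_n mismatch_count.toNat (PySem.Dict.empty, st.2)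
        let level := r.1.items.filter (fun kv => decide (kv.1 ∉ r.2))
        (st.1 ++ [level], r.2)) (acc, conf)).1
    = (ks.foldl (fun (st : List (List (String × String)) × PySem.Set String) k =>
        let source := pvB_sources letters ws k.toNat PySem.Dict.empty
        let banned := PySem.Set.update st.2
          ((source.items.filter (fun p => decide (1 < p.2.length))).map (fun p => p.1))
        let lvl := (source.items.filter
            (fun p => p.2.length == 1 && !(PySem.Set.contains banned p.1))).map
          (fun p => (p.1, p.2.headD ""))
        (st.1 ++ [lvl], banned)) (acc, banned)).1 := by
  intro ks
  induction ks with
  | nil => intro acc conf banned _; rfl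
  | cons k t ih =>
    intro acc conf banned hb
    simp only [List.foldl_cons]
    have h := pv_level_eq letters allow_n hlet ws k.toNat conf banned hb
    rw [h.1]
    exact ih _ _ _ h.2

-- ===== VERDICT (by name: the statement is the Claim_ definition above) =====
theorem construct_mismatch_to_whitelist_map_spec : Claim_equal_construct_mismatch_to_whitelist_map := by
  intro whitelist edit_distance allow_n _ hpre
  unfold Spec_construct_mismatch_to_whitelist_map
  unfold construct_mismatch_to_whitelist_map construct_mismatch_to_whitelist_map_alt
  have hneg : ¬ edit_distance < 0 := by
    unfold Pre_construct_mismatch_to_whitelist_map at hpre; omega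
  rw [if_neg hneg]
  refine congrArg _ ?_
  exact pv_outer (if allow_n then "ACGTN".toList else "ACGT".toList) allow_n
    (by cases allow_n <;> rfl) whitelist
    (PySem.List.pyRange 1 (edit_distance + 1) 1) [] whitelist
    (PySem.Set.ofList whitelist) (fun m => (PySem.Set.mem_ofList whitelist m).symm)
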